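-- pv_equiv track=rewrite | github.com/Crytlig/codewars | capitalsFirst.py | capitals_first
-- ===== SOURCE A (Python) =====
-- def capitals_first(text):
--     words = text.split()
--     st1 = []
--     st2 = []
--     for word in words:
--         if word[0].isalpha():
--             if word[0].isupper():
--                 st1.append(word)
--             else:
--                 st2.append(word)
--     return " ".join(st1 + st2)
-- ===== SOURCE B (Python) =====
-- def capitals_first(text):
--     words = [w for w in text.split() if w[0].isalpha()]
--     return " ".join(sorted(words, key=lambda w: not w[0].isupper()))
-- ===== Notes on version B (the rewrite author's own statement) =====
-- stated objective: idiomatic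
-- what changed: Replaces the two-accumulator classification loop by a comprehension filter plus a single stable sort keyed on whether the first character fails to be uppercase, relying on sort stability to keep each group in its original order.
import Mathlib
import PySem

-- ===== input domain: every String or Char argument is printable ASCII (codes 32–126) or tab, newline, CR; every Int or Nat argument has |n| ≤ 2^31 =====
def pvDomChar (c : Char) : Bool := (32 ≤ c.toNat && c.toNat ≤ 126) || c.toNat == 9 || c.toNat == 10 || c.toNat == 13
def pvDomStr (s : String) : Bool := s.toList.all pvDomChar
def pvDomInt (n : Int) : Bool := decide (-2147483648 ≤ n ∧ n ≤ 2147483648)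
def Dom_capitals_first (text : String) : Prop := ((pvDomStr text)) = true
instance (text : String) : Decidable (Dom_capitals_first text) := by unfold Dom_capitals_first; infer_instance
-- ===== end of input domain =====

-- B replaces A's two-accumulator classification loop by a filter plus a stable sort on the
-- boolean key "first char is not uppercase" (idiomatic; not faster).

-- ===== PORT A =====
-- word[0] on a word from text.split(): split() never yields "", so the [] branch is unreachable
-- (Python would raise IndexError there); the fold carries A's (st1, st2) pair.
def capitalsFirstStepA (p : List String × List String) (word : String) : List String × List String :=
  match word.toList with
  | [] => p
  | c :: _ =>
    if PySem.Chars.isalpha c then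
      if PySem.Chars.isupper c then (p.1 ++ [word], p.2) else (p.1, p.2 ++ [word])
    else p

def capitals_first (text : String) : String :=
  let words := PySem.Str.split₀ text
  let st := words.foldl capitalsFirstStepA ([], [])
  PySem.Str.join " " (st.1 ++ st.2)

-- ===== PORT B =====
def altKeep (w : String) : Bool :=
  match w.toList with
  | [] => false
  | c :: _ => PySem.Chars.isalpha c

-- Python's bool sort key (False < True) ported as Int 0/1
def altKey (w : String) : Int :=
  match w.toList with
  | [] => 1
  | c :: _ => if PySem.Chars.isupper c then 0 else 1

def capitals_first_alt (text : String) : String :=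
  let words := (PySem.Str.split₀ text).filter altKeep
  PySem.Str.join " " (PySem.List.sorted words altKey false)

-- ===== PRECONDITION & SPEC =====
def Spec_capitals_first (text : String) (out : String) : Prop := out = capitals_first_alt text
instance (text : String) (out : String) : Decidable (Spec_capitals_first text out) := by unfold Spec_capitals_first; infer_instance

-- ===== CLAIM (what is proved, stated in full; the proofs are below) =====
def Claim_equal_capitals_first : Prop := ∀ (text : String), Dom_capitals_first text → Spec_capitals_first text (capitals_first text)

-- ===== LEMMAS AND PROOFS =====

def upFst (w : String) : Bool :=
  match w.toList with
  | [] => false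
  | c :: _ => PySem.Chars.isupper c

-- A's fold, with generalized accumulator, is the two filters appended
lemma foldA_eq (ws : List String) : ∀ (s1 s2 : List String),
    ws.foldl capitalsFirstStepA (s1, s2)
      = (s1 ++ ws.filter (fun w => altKeep w && upFst w),
         s2 ++ ws.filter (fun w => altKeep w && !upFst w)) := by
  induction ws with
  | nil => simp
  | cons w ws ih =>
    intro s1 s2
    simp only [List.foldl_cons, List.filter_cons]
    rcases hw : w.toList with _ | ⟨c, cs⟩
    · have hk : altKeep w = false := by simp [altKeep, hw]
      simp [capitalsFirstStepA, hw, hk, ih]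
    · by_cases ha : PySem.Chars.isalpha c
      · by_cases hu : PySem.Chars.isupper c <;>
          simp [capitalsFirstStepA, altKeep, upFst, hw, ha, hu, ih]
      · simp [capitalsFirstStepA, altKeep, hw, ha, ih]

lemma altKey_cases (w : String) : altKey w = 0 ∨ altKey w = 1 := by
  unfold altKey
  rcases w.toList with _ | ⟨c, _⟩
  · simp
  · split <;> simp

lemma insertBy_zero (x : String) (hx : altKey x = 0) :
    ∀ (zs os : List String), (∀ z ∈ zs, altKey z = 0) → (∀ o ∈ os, altKey o = 1) →
    PySem.List.insertBy (fun a b => decide (altKey a < altKey b)) x (zs ++ os)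
      = (zs ++ [x]) ++ os := by
  intro zs
  induction zs with
  | nil =>
    intro os _ hos
    cases os with
    | nil => simp [PySem.List.insertBy]
    | cons o os' =>
      have := hos o (by simp)
      simp [PySem.List.insertBy, hx, this]
  | cons z zs' ih =>
    intro os hzs hos
    have hz := hzs z (by simp)
    simp only [List.cons_append, PySem.List.insertBy, hx, hz]
    simp only [show ¬((0:Int) < 0) by omega, decide_false]
    simp [ih os (fun a ha => hzs a (by simp [ha])) hos]

lemma insertBy_one (x : String) (hx : altKey x = 1) :
    ∀ (l : List String), (∀ z ∈ l, altKey z = 0 ∨ altKey z = 1) →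
    PySem.List.insertBy (fun a b => decide (altKey a < altKey b)) x l = l ++ [x] := by
  intro l
  induction l with
  | nil => intro _; simp [PySem.List.insertBy]
  | cons z zs ih =>
    intro hl
    have hz := hl z (by simp)
    have : ¬ (altKey x < altKey z) := by rcases hz with h | h <;> omega
    simp [PySem.List.insertBy, this, ih (fun a ha => hl a (by simp [ha]))]

-- the stable sort on a 0/1 key is the partition
lemma foldB_eq (ws : List String) : ∀ (zs os : List String),
    (∀ z ∈ zs, altKey z = 0) → (∀ o ∈ os, altKey o = 1) →
    ws.foldl (fun acc x => PySem.List.insertBy (fun a b => decide (altKey a < altKey b)) x acc) (zs ++ os)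
      = (zs ++ ws.filter (fun w => altKey w == 0)) ++ (os ++ ws.filter (fun w => altKey w == 1)) := by
  induction ws with
  | nil => intro zs os _ _; simp
  | cons w ws ih =>
    intro zs os hzs hos
    simp only [List.foldl_cons, List.filter_cons]
    rcases altKey_cases w with hw | hw
    · rw [insertBy_zero w hw zs os hzs hos]
      rw [ih (zs ++ [w]) os
        (by intro z hz; rcases List.mem_append.mp hz with h | h
            · exact hzs z h
            · simp at h; simpa [h] using hw) hos]
      simp [hw]
    · have : zs ++ os ++ [w] = zs ++ (os ++ [w]) := by simp
      rw [insertBy_one w hw (zs ++ os)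
        (by intro z hz; rcases List.mem_append.mp hz with h | h
            · exact Or.inl (hzs z h)
            · exact Or.inr (hos z h)), this,
        ih zs (os ++ [w]) hzs
        (by intro o ho; rcases List.mem_append.mp ho with h | h
            · exact hos o h
            · simp at h; simpa [h] using hw)]
      simp [hw]

lemma sorted_partition (ws : List String) :
    PySem.List.sorted ws altKey false
      = ws.filter (fun w => altKey w == 0) ++ ws.filter (fun w => altKey w == 1) := by
  rw [PySem.List.sorted_eq_foldl_insertBy]
  simpa using foldB_eq ws [] [] (by simp) (by simp)

lemma filter_key_zero (ws : List String) :
    (ws.filter altKeep).filter (fun w => altKey w == 0)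
      = ws.filter (fun w => altKeep w && upFst w) := by
  rw [List.filter_filter]
  apply List.filter_congr
  intro w _
  unfold altKeep altKey upFst
  rcases w.toList with _ | ⟨c, _⟩ <;> (simp; try split) <;> simp_all

lemma filter_key_one (ws : List String) :
    (ws.filter altKeep).filter (fun w => altKey w == 1)
      = ws.filter (fun w => altKeep w && !upFst w) := by
  rw [List.filter_filter]
  apply List.filter_congr
  intro w _
  unfold altKeep altKey upFst
  rcases w.toList with _ | ⟨c, _⟩ <;> (simp; try split) <;> simp_all

-- ===== VERDICT (by name: the statement is the Claim_ definition above) =====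
theorem capitals_first_spec : Claim_equal_capitals_first := by
  intro text _
  simp only [Spec_capitals_first, capitals_first, capitals_first_alt]
  rw [sorted_partition, filter_key_zero, filter_key_one]
  rw [show ((PySem.Str.split₀ text).foldl capitalsFirstStepA ([], []))
      = ([] ++ (PySem.Str.split₀ text).filter (fun w => altKeep w && upFst w),
         [] ++ (PySem.Str.split₀ text).filter (fun w => altKeep w && !upFst w))
    from foldA_eq _ [] []]
  simp
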